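-- pv_equiv track=rewrite | github.com/huawei-csl/GENIAL | src/genial/utils/sample_output_dir.py | get_number_of_samples_per_bin_needed
-- ===== SOURCE A (Python) =====
-- def get_number_of_samples_per_bin_needed(
--     bin_to_design_map: dict[str, list[str]],
--     tgt_nb_samples: int,
-- ):
--     """
--     This functionary uses a binary search to determine the right number of samples per bin needed to reach the
--     target number of samples.
--     """
--     # Get a bin id to bin count map
--     bin_to_design_map_count = {k: len(v) for k, v in bin_to_design_map.items()}
--
--     # Find the right number of samples to retrieve per bin
--     low = 0
--     high = max(bin_to_design_map_count.values())
--
--     # Function to get the number of samples retrieved depending on the max element count per bin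
--     def get_total_w_cap(bin_to_design_map_count, el_count):
--         return sum(min(el_count, bin_count) for bin_count in bin_to_design_map_count.values())
--
--     # Apply binary search
--     while low < high:
--         mid = (low + high + 1) // 2
--         if get_total_w_cap(bin_to_design_map_count, el_count=mid) < tgt_nb_samples:
--             low = mid
--         else:
--             high = mid - 1
--
--     return low
-- ===== SOURCE B (Python) =====
-- def get_number_of_samples_per_bin_needed(
--     bin_to_design_map: dict[str, list[str]],
--     tgt_nb_samples: int,
-- ):
--     """Sort the bin counts once and scan them with a running prefix sum: for each
--     suffix of `rem` bins the capped total of a cap c is prefix + c * rem, so the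
--     largest admissible cap inside each segment is found by one integer division."""
--     counts = sorted(len(v) for v in bin_to_design_map.values())
--     best = 0
--     prefix = 0
--     rem = len(counts)
--     for a in counts:
--         # largest c with prefix + c * rem < tgt_nb_samples
--         c = -((prefix - tgt_nb_samples) // rem) - 1
--         cand = min(c, a)
--         if cand > best:
--             best = cand
--         prefix += a
--         rem -= 1
--     return best
-- ===== Notes on version B (the rewrite author's own statement) =====
-- stated objective: alternative
-- what changed: Replaces A's binary search over cap values (which recomputes the whole capped total for every probe) by sorting the bin counts once and scanning them with a running prefix sum, computing the best cap of each sorted segment with a single integer division; Pre_ excludes the empty map, on which A's max() raises ValueError, and association lists with duplicate keys, which do not represent a value of the parameter's Python type dict.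
import Mathlib
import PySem

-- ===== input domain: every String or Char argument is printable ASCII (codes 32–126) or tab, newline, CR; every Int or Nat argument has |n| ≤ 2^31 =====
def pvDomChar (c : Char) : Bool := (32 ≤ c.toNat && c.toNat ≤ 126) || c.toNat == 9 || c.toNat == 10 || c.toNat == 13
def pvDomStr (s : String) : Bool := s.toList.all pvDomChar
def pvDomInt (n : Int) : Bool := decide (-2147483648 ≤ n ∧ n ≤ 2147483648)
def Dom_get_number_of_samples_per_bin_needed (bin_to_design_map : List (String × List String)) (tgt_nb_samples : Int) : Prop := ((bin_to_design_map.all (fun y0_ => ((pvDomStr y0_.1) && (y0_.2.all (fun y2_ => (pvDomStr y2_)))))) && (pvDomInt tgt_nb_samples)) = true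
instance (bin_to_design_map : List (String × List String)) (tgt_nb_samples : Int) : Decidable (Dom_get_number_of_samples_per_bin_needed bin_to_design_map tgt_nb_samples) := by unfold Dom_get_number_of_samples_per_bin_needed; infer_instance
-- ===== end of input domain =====

-- B replaces A's binary search over cap values by a sort + prefix-sum scan that finds the best cap
-- of each segment with one integer division (objective: a genuinely different, alternative algorithm).

-- ===== PORT A =====
-- {k: len(v) for k, v in bin_to_design_map.items()} (bin-count dict; only its values are used)
def aCountDict (bin_to_design_map : List (String × List String)) : PySem.Dict String Int :=
  bin_to_design_map.foldl (fun d p => d.insert p.1 (p.2.length : Int)) PySem.Dict.empty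

-- get_total_w_cap: sum(min(el_count, bin_count) for bin_count in counts)
def aTotalWCap (counts : List Int) (el_count : Int) : Int :=
  counts.foldl (fun s c => s + min el_count c) 0

-- the midpoint (low + high + 1) // 2 of the while loop
def aMid (low high : Int) : Int := PySem.Int.floordiv (low + high + 1) 2

theorem aMid_bounds {low high : Int} (h : low < high) :
    low < aMid low high ∧ aMid low high ≤ high := by
  have e : low + high + 1 = (low + 1) + high := by ring
  have := PySem.Int.floordiv_two_mid_bounds (lo := low + 1) (hi := high) (by omega)
  unfold aMid; rw [e]; omega

-- the `while low < high` loop of A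
def aLoop (counts : List Int) (tgt low high : Int) : Int :=
  if h : low < high then
    let mid := aMid low high
    if aTotalWCap counts mid < tgt then aLoop counts tgt mid high
    else aLoop counts tgt low (mid - 1)
  else low
termination_by (high - low).toNat
decreasing_by
  · have := aMid_bounds h; omega
  · have := aMid_bounds h; omega

def get_number_of_samples_per_bin_needed (bin_to_design_map : List (String × List String)) (tgt_nb_samples : Int) : Int :=
  let counts := (aCountDict bin_to_design_map).values
  -- Python's max() raises ValueError on an empty dict; Pre_ excludes that input, .getD 0 is a placeholder
  let high := (PySem.List.max? counts (fun x => x)).getD 0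
  aLoop counts tgt_nb_samples 0 high

-- ===== PORT B =====
-- one loop step of Source B: candidate cap for the current segment, running prefix sum, remaining-bin count
def bStep (tgt : Int) (s : Int × Int × Int) (a : Int) : Int × Int × Int :=
  let c := -(PySem.Int.floordiv (s.2.1 - tgt) s.2.2) - 1
  let cand := min c a
  (if cand > s.1 then cand else s.1, s.2.1 + a, s.2.2 - 1)

def get_number_of_samples_per_bin_needed_alt (bin_to_design_map : List (String × List String)) (tgt_nb_samples : Int) : Int :=
  let counts := PySem.List.sorted (bin_to_design_map.map (fun p => (p.2.length : Int))) (fun x => x)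
  (counts.foldl (bStep tgt_nb_samples) (0, 0, (counts.length : Int))).1

-- ===== PRECONDITION & SPEC =====
-- Pre_ excludes (a) the empty map, on which A's max() raises ValueError, and (b) association
-- lists with duplicate keys, which do not represent a value of dict, the parameter's Python type.
def Pre_get_number_of_samples_per_bin_needed (bin_to_design_map : List (String × List String)) (tgt_nb_samples : Int) : Prop :=
  bin_to_design_map ≠ [] ∧ (bin_to_design_map.map Prod.fst).Nodup
instance (bin_to_design_map : List (String × List String)) (tgt_nb_samples : Int) : Decidable (Pre_get_number_of_samples_per_bin_needed bin_to_design_map tgt_nb_samples) := by unfold Pre_get_number_of_samples_per_bin_needed; infer_instance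

def pvWitness_get_number_of_samples_per_bin_needed : (List (String × List String)) × Int :=
  ([("a", ["x", "y"]), ("b", ["z"])], 2)

def Spec_get_number_of_samples_per_bin_needed (bin_to_design_map : List (String × List String)) (tgt_nb_samples : Int) (out : Int) : Prop := out = get_number_of_samples_per_bin_needed_alt bin_to_design_map tgt_nb_samples
instance (bin_to_design_map : List (String × List String)) (tgt_nb_samples : Int) (out : Int) : Decidable (Spec_get_number_of_samples_per_bin_needed bin_to_design_map tgt_nb_samples out) := by unfold Spec_get_number_of_samples_per_bin_needed; infer_instance

-- ===== CLAIM (what is proved, stated in full; the proofs are below) =====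
def Claim_equal_get_number_of_samples_per_bin_needed : Prop := ∀ (bin_to_design_map : List (String × List String)) (tgt_nb_samples : Int), Dom_get_number_of_samples_per_bin_needed bin_to_design_map tgt_nb_samples → Pre_get_number_of_samples_per_bin_needed bin_to_design_map tgt_nb_samples → Spec_get_number_of_samples_per_bin_needed bin_to_design_map tgt_nb_samples (get_number_of_samples_per_bin_needed bin_to_design_map tgt_nb_samples)
-- ===== LEMMAS AND PROOFS =====

-- the capped total as a sum over a map, and its arithmetic
def capSum (l : List Int) (c : Int) : Int := (l.map (fun x => min c x)).sum

theorem aTotal_general (l : List Int) (c : Int) :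
    ∀ s0 : Int, l.foldl (fun s x => s + min c x) s0 = s0 + capSum l c := by
  induction l with
  | nil => intro s0; simp [capSum]
  | cons x t ih => intro s0; simp [capSum, List.foldl_cons, ih, List.sum_cons]; ring

theorem aTotalWCap_eq_capSum (l : List Int) (c : Int) : aTotalWCap l c = capSum l c := by
  have := aTotal_general l c 0; simpa [aTotalWCap] using this

theorem capSum_mono {l : List Int} {c d : Int} (h : c ≤ d) : capSum l c ≤ capSum l d := by
  induction l with
  | nil => simp [capSum]
  | cons x t ih =>
    simp only [capSum, List.map_cons, List.sum_cons] at *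
    exact add_le_add (min_le_min_right x h) ih

theorem capSum_le_elems (l : List Int) (c : Int) : capSum l c ≤ l.sum := by
  induction l with
  | nil => simp [capSum]
  | cons x t ih =>
    simp only [capSum, List.map_cons, List.sum_cons] at *
    exact add_le_add (min_le_right c x) ih

theorem capSum_le_const (l : List Int) (c : Int) : capSum l c ≤ c * l.length := by
  induction l with
  | nil => simp [capSum]
  | cons x t ih =>
    simp only [capSum, List.map_cons, List.sum_cons, List.length_cons] at *
    have : c * ((t.length : Int) + 1) = c + c * t.length := by ring
    push_cast
    rw [this]
    exact add_le_add (min_le_left c x) ih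

theorem capSum_append (l1 l2 : List Int) (c : Int) :
    capSum (l1 ++ l2) c = capSum l1 c + capSum l2 c := by
  simp [capSum]

theorem capSum_le_split (pre rest : List Int) (c : Int) :
    capSum (pre ++ rest) c ≤ pre.sum + c * rest.length := by
  rw [capSum_append]
  exact add_le_add (capSum_le_elems pre c) (capSum_le_const rest c)

theorem capSum_eq_split (pre rest : List Int) (r : Int)
    (hpre : ∀ x ∈ pre, x ≤ r) (hrest : ∀ x ∈ rest, r + 1 ≤ x) :
    capSum (pre ++ rest) (r + 1) = pre.sum + (r + 1) * rest.length := by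
  rw [capSum_append]
  have h1 : capSum pre (r + 1) = pre.sum := by
    unfold capSum
    rw [List.map_congr_left (fun x hx => by
      have := hpre x hx; exact min_eq_right (by omega))]
    simp
  have h2 : capSum rest (r + 1) = (r + 1) * rest.length := by
    unfold capSum
    rw [List.map_congr_left (fun x hx => min_eq_left (hrest x hx))]
    simp [mul_comm]
  rw [h1, h2]

theorem capSum_perm {l1 l2 : List Int} (h : l1.Perm l2) (c : Int) : capSum l1 c = capSum l2 c :=
  (h.map _).sum_eq

-- "the answer": r is the largest cap in [0, M] whose capped total stays below tgt
def Ans (l : List Int) (tgt M r : Int) : Prop :=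
  0 ≤ r ∧ r ≤ M ∧ (r = 0 ∨ capSum l r < tgt) ∧ (r = M ∨ ¬ capSum l (r + 1) < tgt)

theorem Ans_unique {l : List Int} {tgt M r1 r2 : Int}
    (h1 : Ans l tgt M r1) (h2 : Ans l tgt M r2) : r1 = r2 := by
  obtain ⟨h10, h1M, h1s, h1c⟩ := h1
  obtain ⟨h20, h2M, h2s, h2c⟩ := h2
  by_contra hne
  rcases lt_trichotomy r1 r2 with h | h | h
  · have hs2 : capSum l r2 < tgt := by rcases h2s with h' | h' <;> [omega; exact h']
    have hc1 : ¬ capSum l (r1 + 1) < tgt := by rcases h1c with h' | h' <;> [omega; exact h']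
    exact hc1 (lt_of_le_of_lt (capSum_mono (by omega)) hs2)
  · exact hne h
  · have hs1 : capSum l r1 < tgt := by rcases h1s with h' | h' <;> [omega; exact h']
    have hc2 : ¬ capSum l (r2 + 1) < tgt := by rcases h2c with h' | h' <;> [omega; exact h']
    exact hc2 (lt_of_le_of_lt (capSum_mono (by omega)) hs1)

-- the candidate produced by one integer division is the LARGEST c with p + c * len < tgt
theorem cand_bracket (p tgt len : Int) (hlen : 1 ≤ len) :
    p + (-(PySem.Int.floordiv (p - tgt) len) - 1) * len < tgt ∧
    tgt ≤ p + (-(PySem.Int.floordiv (p - tgt) len) - 1 + 1) * len := by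
  have hdm := PySem.Int.floordiv_mul_add_mod (p - tgt) len
  have hme : PySem.Int.mod (p - tgt) len = (p - tgt) % len := PySem.Int.mod_eq_emod_of_pos (by omega)
  have hm0 : 0 ≤ (p - tgt) % len := Int.emod_nonneg _ (by omega)
  have hm1 : (p - tgt) % len < len := Int.emod_lt_of_pos _ (by omega)
  set q := PySem.Int.floordiv (p - tgt) len with hq
  rw [hme] at hdm
  constructor
  · nlinarith [hdm, hm0, hm1]
  · nlinarith [hdm, hm0, hm1]

-- ===== A side: the binary-search loop lands on Ans =====
theorem aLoop_spec (counts : List Int) (tgt M : Int) :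
    ∀ (n : Nat) (low high : Int), (high - low).toNat ≤ n →
    0 ≤ low → low ≤ high → high ≤ M →
    (low = 0 ∨ capSum counts low < tgt) →
    (high = M ∨ ¬ capSum counts (high + 1) < tgt) →
    Ans counts tgt M (aLoop counts tgt low high) := by
  intro n
  induction n with
  | zero =>
    intro low high hn h0 hlh hhM hs hc
    have hnl : ¬ low < high := by omega
    rw [aLoop, dif_neg hnl]
    have : low = high := by omega
    subst this
    exact ⟨h0, hhM, hs, hc⟩
  | succ n ih =>
    intro low high hn h0 hlh hhM hs hc
    by_cases h : low < high
    · rw [aLoop, dif_pos h]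
      have hm := aMid_bounds h
      simp only
      split_ifs with ht
      · rw [aTotalWCap_eq_capSum] at ht
        exact ih (aMid low high) high (by omega) (by omega) (by omega) hhM (Or.inr ht) hc
      · rw [aTotalWCap_eq_capSum] at ht
        refine ih low (aMid low high - 1) (by omega) h0 (by omega) (by omega) hs (Or.inr ?_)
        have : aMid low high - 1 + 1 = aMid low high := by ring
        rw [this]; exact ht
    · rw [aLoop, dif_neg h]
      have : low = high := by omega
      subst this
      exact ⟨h0, hhM, hs, hc⟩

-- ===== B side: fold lemmas =====
-- (1) the best-so-far only grows
theorem bFold_ge (tgt : Int) (rest : List Int) :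
    ∀ (b p q : Int), b ≤ (rest.foldl (bStep tgt) (b, p, q)).1 := by
  induction rest with
  | nil => intro b p q; simp
  | cons a t ih =>
    intro b p q
    simp only [List.foldl_cons]
    refine le_trans ?_ (ih _ _ _)
    simp only [bStep]
    split_ifs with h
    · exact le_of_lt h
    · exact le_refl b

-- (2) it never exceeds a bound dominating the start and all elements
theorem bFold_le (tgt Mv : Int) (rest : List Int) :
    ∀ (b p q : Int), b ≤ Mv → (∀ x ∈ rest, x ≤ Mv) →
    (rest.foldl (bStep tgt) (b, p, q)).1 ≤ Mv := by
  induction rest with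
  | nil => intro b p q hb _; simpa using hb
  | cons a t ih =>
    intro b p q hb hx
    simp only [List.foldl_cons]
    refine ih _ _ _ ?_ (fun x hx' => hx x (List.mem_cons_of_mem a hx'))
    simp only [bStep]
    split_ifs with h
    · exact le_trans (min_le_right _ a) (hx a List.mem_cons_self)
    · exact hb

theorem bFold_sound (tgt : Int) (rest : List Int) :
    ∀ (done : List Int) (b : Int), 0 ≤ b →
    (b = 0 ∨ capSum (done ++ rest) b < tgt) →
    0 ≤ (rest.foldl (bStep tgt) (b, done.sum, (rest.length : Int))).1 ∧
    ((rest.foldl (bStep tgt) (b, done.sum, (rest.length : Int))).1 = 0 ∨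
      capSum (done ++ rest) (rest.foldl (bStep tgt) (b, done.sum, (rest.length : Int))).1 < tgt) := by
  induction rest with
  | nil =>
    intro done b hb hs
    simp only [List.foldl_nil]
    exact ⟨hb, by simpa using hs⟩
  | cons a t ih =>
    intro done b hb hs
    simp only [List.foldl_cons]
    have hlen : (1 : Int) ≤ ((a :: t).length : Int) := by rw [List.length_cons]; push_cast; omega
    have hstep : bStep tgt (b, done.sum, ((a :: t).length : Int)) a
        = (if min (-(PySem.Int.floordiv (done.sum - tgt) ((a :: t).length : Int)) - 1) a > b
             then min (-(PySem.Int.floordiv (done.sum - tgt) ((a :: t).length : Int)) - 1) a else b,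
           done.sum + a, ((a :: t).length : Int) - 1) := rfl
    have harr : done.sum + a = (done ++ [a]).sum := by simp
    have hlen2 : ((a :: t).length : Int) - 1 = (t.length : Int) := by rw [List.length_cons]; push_cast; ring
    have hassoc : (done ++ [a]) ++ t = done ++ a :: t := by simp
    rw [hstep, harr, hlen2]
    by_cases hgt : min (-(PySem.Int.floordiv (done.sum - tgt) ((a :: t).length : Int)) - 1) a > b
    · rw [if_pos hgt]
      have hb' : 0 ≤ min (-(PySem.Int.floordiv (done.sum - tgt) ((a :: t).length : Int)) - 1) a := by omega
      have hbr := cand_bracket done.sum tgt ((a :: t).length : Int) hlen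
      have hsum : capSum (done ++ a :: t) (min (-(PySem.Int.floordiv (done.sum - tgt) ((a :: t).length : Int)) - 1) a) < tgt := by
        calc capSum (done ++ a :: t) (min (-(PySem.Int.floordiv (done.sum - tgt) ((a :: t).length : Int)) - 1) a)
            ≤ done.sum + (min (-(PySem.Int.floordiv (done.sum - tgt) ((a :: t).length : Int)) - 1) a) * ((a :: t).length : Int) :=
              capSum_le_split done (a :: t) _
          _ ≤ done.sum + (-(PySem.Int.floordiv (done.sum - tgt) ((a :: t).length : Int)) - 1) * ((a :: t).length : Int) := by
              have h1 : min (-(PySem.Int.floordiv (done.sum - tgt) ((a :: t).length : Int)) - 1) a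
                  ≤ -(PySem.Int.floordiv (done.sum - tgt) ((a :: t).length : Int)) - 1 := min_le_left _ a
              nlinarith
          _ < tgt := hbr.1
      have := ih (done ++ [a]) _ hb' (by rw [hassoc]; exact Or.inr hsum)
      rwa [hassoc] at this
    · rw [if_neg hgt]
      have := ih (done ++ [a]) b hb (by rw [hassoc]; exact hs)
      rwa [hassoc] at this

theorem bFold_cand (tgt : Int) (rest : List Int) :
    ∀ (done b : Int) (pre : List Int) (a : Int) (post : List Int), rest = pre ++ a :: post →
    min (-(PySem.Int.floordiv (done + pre.sum - tgt) ((a :: post).length : Int)) - 1) a ≤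
      (rest.foldl (bStep tgt) (b, done, (rest.length : Int))).1 := by
  induction rest with
  | nil => intro done b pre a post h; exact absurd h (by simp)
  | cons x t ih =>
    intro done b pre a post h
    cases pre with
    | nil =>
      simp only [List.nil_append] at h
      injection h with h1 h2
      subst h1; subst h2
      simp only [List.foldl_cons, List.sum_nil, add_zero]
      have hstep : bStep tgt (b, done, ((x :: t).length : Int)) x
          = (if min (-(PySem.Int.floordiv (done - tgt) ((x :: t).length : Int)) - 1) x > b
               then min (-(PySem.Int.floordiv (done - tgt) ((x :: t).length : Int)) - 1) x else b,
             done + x, ((x :: t).length : Int) - 1) := rfl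
      rw [hstep]
      refine le_trans ?_ (bFold_ge tgt t _ _ _)
      split_ifs with hgt
      · exact le_refl _
      · omega
    | cons y pre' =>
      simp only [List.cons_append] at h
      injection h with h1 h2
      subst h1
      simp only [List.foldl_cons]
      have hstep : bStep tgt (b, done, ((x :: t).length : Int)) x
          = (if min (-(PySem.Int.floordiv (done - tgt) ((x :: t).length : Int)) - 1) x > b
               then min (-(PySem.Int.floordiv (done - tgt) ((x :: t).length : Int)) - 1) x else b,
             done + x, ((x :: t).length : Int) - 1) := rfl
      have hlen2 : ((x :: t).length : Int) - 1 = (t.length : Int) := by rw [List.length_cons]; push_cast; ring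
      rw [hstep, hlen2]
      have hsum : done + (x :: pre').sum = (done + x) + pre'.sum := by
        rw [List.sum_cons]; ring
      rw [hsum]
      exact ih (done + x) _ pre' a post h2

theorem dropWhile_head_false {p : Int → Bool} : ∀ (l : List Int) (a : Int) (post : List Int),
    l.dropWhile p = a :: post → p a = false := by
  intro l
  induction l with
  | nil => intro a post h; simp [List.dropWhile] at h
  | cons x t ih =>
    intro a post h
    by_cases hp : p x
    · rw [List.dropWhile_cons_of_pos hp] at h
      exact ih a post h
    · rw [List.dropWhile_cons_of_neg hp] at h
      injection h with h1 h2
      subst h1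
      simpa using hp


theorem b_result_ans (counts : List Int) (tgt M : Int)
    (hpos : ∀ x ∈ counts, 0 ≤ x) (hM : M ∈ counts) (hMx : ∀ x ∈ counts, x ≤ M) :
    Ans counts tgt M
      ((PySem.List.sorted counts (fun x => x)).foldl (bStep tgt)
        (0, 0, ((PySem.List.sorted counts (fun x => x)).length : Int))).1 := by
  set s := PySem.List.sorted counts (fun x => x) with hsdef
  have hperm : s.Perm counts := PySem.List.sorted_perm counts (fun x => x) false
  have hcs : ∀ c, capSum s c = capSum counts c := fun c => capSum_perm hperm c
  have hsound := bFold_sound tgt s [] 0 le_rfl (Or.inl rfl)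
  simp only [List.nil_append, List.sum_nil] at hsound
  set r := (s.foldl (bStep tgt) (0, 0, (s.length : Int))).1 with hrdef
  have hr0 : 0 ≤ r := hsound.1
  have hrM : r ≤ M := by
    refine bFold_le tgt M s 0 0 _ (hpos M hM) ?_
    intro x hx
    exact hMx x ((PySem.List.mem_sorted counts (fun x => x) false x).mp hx)
  refine ⟨hr0, hrM, ?_, ?_⟩
  · rcases hsound.2 with h | h
    · exact Or.inl h
    · exact Or.inr (by rw [← hcs r]; exact h)
  · by_cases hrMeq : r = M
    · exact Or.inl hrMeq
    refine Or.inr ?_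
    intro hlt
    have hlt' : capSum s (r + 1) < tgt := by rw [hcs]; exact hlt
    -- split s at the first element greater than r
    have hsplit : s.takeWhile (fun x => decide (x ≤ r)) ++ s.dropWhile (fun x => decide (x ≤ r)) = s :=
      List.takeWhile_append_dropWhile
    have hdne : s.dropWhile (fun x => decide (x ≤ r)) ≠ [] := by
      intro hnil
      have hMs : M ∈ s := (PySem.List.mem_sorted counts (fun x => x) false M).mpr hM
      rw [← hsplit, hnil, List.append_nil] at hMs
      have := List.mem_takeWhile_imp hMs
      simp at this
      omega
    obtain ⟨a, post, hdrop⟩ : ∃ a post, s.dropWhile (fun x => decide (x ≤ r)) = a :: post := by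
      cases hd : s.dropWhile (fun x => decide (x ≤ r)) with
      | nil => exact absurd hd hdne
      | cons a post => exact ⟨a, post, rfl⟩
    have ha : ¬ (a ≤ r) := by
      have := dropWhile_head_false s a post hdrop
      simpa using this
    set pre := s.takeWhile (fun x => decide (x ≤ r)) with hpredef
    have hseq : pre ++ a :: post = s := by rw [hpredef, ← hdrop]; exact hsplit
    have hpre : ∀ x ∈ pre, x ≤ r := by
      intro x hx
      have := List.mem_takeWhile_imp hx
      simpa using this
    have hpost : ∀ x ∈ a :: post, r + 1 ≤ x := by
      have hP : s.Pairwise (fun u v => u ≤ v) := PySem.List.sorted_pairwise counts (fun x => x)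
      rw [← hseq] at hP
      have h2 := (List.pairwise_append.mp hP).2.1
      have h3 := (List.pairwise_cons.mp h2).1
      intro x hx
      rcases List.mem_cons.mp hx with rfl | hx'
      · omega
      · have := h3 x hx'
        omega
    have hcap : capSum s (r + 1) = pre.sum + (r + 1) * ((a :: post).length : Int) := by
      rw [← hseq]
      exact capSum_eq_split pre (a :: post) r hpre hpost
    have hlen : (1 : Int) ≤ ((a :: post).length : Int) := by
      rw [List.length_cons]; push_cast; omega
    have hbr := cand_bracket pre.sum tgt ((a :: post).length : Int) hlen
    have hcge : r + 1 ≤ -(PySem.Int.floordiv (pre.sum - tgt) ((a :: post).length : Int)) - 1 := by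
      by_contra hcl
      push_neg at hcl
      have h1 : -(PySem.Int.floordiv (pre.sum - tgt) ((a :: post).length : Int)) - 1 + 1 ≤ r + 1 := by omega
      have h2 : (-(PySem.Int.floordiv (pre.sum - tgt) ((a :: post).length : Int)) - 1 + 1) * ((a :: post).length : Int)
          ≤ (r + 1) * ((a :: post).length : Int) := by nlinarith
      rw [hcap] at hlt'
      nlinarith [hbr.2]
    have hcand := bFold_cand tgt s 0 0 pre a post hseq.symm
    rw [zero_add] at hcand
    have : r + 1 ≤ r := by
      refine le_trans ?_ hcand
      have : ¬ (a ≤ r) := ha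
      omega
    omega

-- ===== main equivalence =====
theorem values_aCountDict (m : List (String × List String)) (hnd : (m.map Prod.fst).Nodup) :
    (aCountDict m).values = m.map (fun p => (p.2.length : Int)) := by
  unfold aCountDict
  have h := PySem.Dict.items_foldl_insert_fresh m Prod.fst (fun p => (p.2.length : Int))
      PySem.Dict.empty (fun a _ => PySem.Dict.contains_empty a.1) hnd
  have hv : ∀ d : PySem.Dict String Int, d.values = d.items.map Prod.snd := fun d => rfl
  rw [hv]
  rw [show (fun (d : PySem.Dict String Int) (p : String × List String) =>
        d.insert p.1 (p.2.length : Int))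
      = (fun d a => d.insert (Prod.fst a) ((fun p : String × List String => (p.2.length : Int)) a))
      from rfl, h]
  simp only [show PySem.Dict.empty.items = ([] : List (String × Int)) from rfl,
    List.map_nil, List.nil_append, List.map_map]
  apply List.map_congr_left
  intro a _
  rfl

-- ===== VERDICT (by name: the statement is the Claim_ definition above) =====
theorem get_number_of_samples_per_bin_needed_spec : Claim_equal_get_number_of_samples_per_bin_needed := by
  intro m tgt _ hpre
  obtain ⟨hne, hnd⟩ := hpre
  unfold Spec_get_number_of_samples_per_bin_needed
  unfold get_number_of_samples_per_bin_needed get_number_of_samples_per_bin_needed_alt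
  simp only
  rw [values_aCountDict m hnd]
  have hcne : m.map (fun p => (p.2.length : Int)) ≠ [] := by
    intro h; exact hne (List.map_eq_nil_iff.mp h)
  have hpos : ∀ x ∈ m.map (fun p => (p.2.length : Int)), 0 ≤ x := by
    intro x hx
    obtain ⟨p, _, rfl⟩ := List.mem_map.mp hx
    positivity
  rcases hmx : PySem.List.max? (m.map (fun p => (p.2.length : Int))) (fun x => x) with _ | M
  · exact absurd ((PySem.List.max?_eq_none_iff _ _).mp hmx) hcne
  have hM : M ∈ m.map (fun p => (p.2.length : Int)) := PySem.List.max?_mem hmx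
  have hMx : ∀ x ∈ m.map (fun p => (p.2.length : Int)), x ≤ M :=
    fun y hy => PySem.List.max?_isMax hmx y hy
  have hA := aLoop_spec (m.map (fun p => (p.2.length : Int))) tgt M (M - 0).toNat 0 M
      le_rfl le_rfl (hpos M hM) le_rfl (Or.inl rfl) (Or.inl rfl)
  have hB := b_result_ans (m.map (fun p => (p.2.length : Int))) tgt M hpos hM hMx
  rw [hmx]
  simpa using Ans_unique hA hB
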